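-- pv_equiv track=rewrite | github.com/aviadcohz/real_world_texture_boundary | texture_boundary_pipeline/core/sa2va_boundaries.py | parse_texture_description
-- ===== SOURCE A (Python) =====
-- from typing import Union, Tuple, List, Dict
--
-- def parse_texture_description(description: str) -> Tuple[str, str]:
--     """
--     Parse texture description into two textures.
--
--     Args:
--         description: e.g., "smooth grass to rough stone wall"
--
--     Returns:
--         (texture_a, texture_b)
--
--     Examples:
--         "smooth grass to rough stone wall" → ("smooth grass", "rough stone wall")
--         "wood to metal" → ("wood", "metal")
--     """
--     # Primary: split by " <TO> " (unambiguous separator from grounding prompt)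
--     if ' <TO> ' in description:
--         parts = description.split(' <TO> ', 1)
--         return parts[0].strip(), parts[1].strip()
--
--     # Fallback: split by " to " (legacy format)
--     parts = description.split(' to ')
--     if len(parts) == 2:
--         return parts[0].strip(), parts[1].strip()
--     elif len(parts) > 2:
--         # Multiple " to " — pick the most balanced split
--         best_split = 1
--         best_balance = float('inf')
--         for i in range(1, len(parts)):
--             left = ' to '.join(parts[:i])
--             right = ' to '.join(parts[i:])
--             balance = abs(len(left.split()) - len(right.split()))
--             if balance < best_balance:
--                 best_balance = balance
--                 best_split = i
--         left = ' to '.join(parts[:best_split])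
--         right = ' to '.join(parts[best_split:])
--         return left.strip(), right.strip()
--
--     # Try other separators
--     for sep in [' and ', ' vs ', ' | ']:
--         if sep in description:
--             parts = description.split(sep, 1)
--             return parts[0].strip(), parts[1].strip()
--
--     # Fallback: split in half
--     words = description.split()
--     mid = len(words) // 2
--     return ' '.join(words[:mid]), ' '.join(words[mid:])
-- ===== SOURCE B (Python) =====
-- def _halves(description, sep):
--     """Two stripped pieces around the first occurrence of sep."""
--     left, right = description.split(sep, 1)
--     return left.strip(), right.strip()
--
--
-- def parse_texture_description(description):
--     """Same result as A, by a different decomposition: one shared helper for all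
--     first-occurrence separator splits, the n==2 and n>2 ' to ' cases merged into
--     one balanced-split pass driven by prefix sums of per-part word counts (no
--     re-join/re-split per candidate index), and the fallback separators scanned
--     with a generator."""
--     if ' <TO> ' in description:
--         return _halves(description, ' <TO> ')
--
--     parts = description.split(' to ')
--     n = len(parts)
--     if n >= 2:
--         # word count of ' to '.join(qs) = sum of per-part word counts + len(qs) - 1
--         wc = [len(p.split()) for p in parts]
--         total = sum(wc) + n - 1
--         prefix, acc = [0], 0
--         for w in wc:
--             acc += w
--             prefix.append(acc)
--         best_split, best_bal = 1, None
--         for i in range(1, n):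
--             lw = prefix[i] + i - 1
--             bal = abs(2 * lw + 1 - total)
--             if best_bal is None or bal < best_bal:
--                 best_bal, best_split = bal, i
--         return (' to '.join(parts[:best_split]).strip(),
--                 ' to '.join(parts[best_split:]).strip())
--
--     sep = next((s for s in (' and ', ' vs ', ' | ') if s in description), None)
--     if sep is not None:
--         return _halves(description, sep)
--
--     words = description.split()
--     mid = len(words) // 2
--     return ' '.join(words[:mid]), ' '.join(words[mid:])
-- ===== Notes on version B (the rewrite author's own statement) =====
-- stated objective: alternative
-- what changed: B re-decomposes the whole parse: one shared _halves helper serves every first-occurrence separator split, the fallback separators are found by a generator scan over a list, and the two-part and many-part cases of the legacy separator are merged into one balanced-split pass that uses prefix sums of per-part word counts (constant-time arithmetic per candidate index) instead of A's per-index re-join and re-split of the string.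
import Mathlib
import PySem

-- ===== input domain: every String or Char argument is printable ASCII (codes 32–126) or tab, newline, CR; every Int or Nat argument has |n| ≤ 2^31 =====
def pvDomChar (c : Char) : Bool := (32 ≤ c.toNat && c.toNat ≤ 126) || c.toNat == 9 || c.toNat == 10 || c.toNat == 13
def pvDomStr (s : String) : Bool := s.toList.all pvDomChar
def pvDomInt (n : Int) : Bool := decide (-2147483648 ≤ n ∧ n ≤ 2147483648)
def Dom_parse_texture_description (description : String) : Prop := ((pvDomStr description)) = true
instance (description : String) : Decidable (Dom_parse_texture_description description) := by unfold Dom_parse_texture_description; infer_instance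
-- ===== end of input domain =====

-- B re-decomposes A: one shared halves-helper for every first-occurrence separator split,
-- the 2-part and many-part ' to ' cases merged into one prefix-sum balanced-split pass
-- (no re-join/re-split per candidate), fallback separators found by a list scan.

-- ===== PORT A =====
def parse_texture_description (description : String) : String × String :=
  -- if ' <TO> ' in description: return the two stripped halves of split(' <TO> ', 1)
  if PySem.Str.isIn " <TO> " description then
    -- the separator occurs, so the split has exactly 2 parts; indices 0 and 1 are in range
    let parts := (PySem.Str.splitMax? description " <TO> " 1).getD []
    (PySem.Str.strip (parts.getD 0 ""), PySem.Str.strip (parts.getD 1 ""))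
  else
    let parts := (PySem.Str.split? description " to ").getD []
    if parts.length = 2 then
      (PySem.Str.strip (parts.getD 0 ""), PySem.Str.strip (parts.getD 1 ""))
    else if 2 < parts.length then
      -- best_balance starts as float('inf'); modelled as `none` (strictly above every Int)
      let res := (PySem.List.pyRange 1 (parts.length : Int) 1).foldl
        (fun (st : Int × Option Int) i =>
          let leftS := PySem.Str.join " to " (PySem.List.slice parts none (some i))
          let rightS := PySem.Str.join " to " (PySem.List.slice parts (some i) none)
          let balance : Int :=
            |((PySem.Str.split₀ leftS).length : Int) - ((PySem.Str.split₀ rightS).length : Int)|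
          if (match st.2 with | none => true | some b => decide (balance < b)) then (i, some balance)
          else st)
        (1, none)
      (PySem.Str.strip (PySem.Str.join " to " (PySem.List.slice parts none (some res.1))),
       PySem.Str.strip (PySem.Str.join " to " (PySem.List.slice parts (some res.1) none)))
    else
      -- 'for sep in [' and ', ' vs ', ' | ']: if sep in description: return …' unrolled
      if PySem.Str.isIn " and " description then
        let ps := (PySem.Str.splitMax? description " and " 1).getD []
        (PySem.Str.strip (ps.getD 0 ""), PySem.Str.strip (ps.getD 1 ""))
      else if PySem.Str.isIn " vs " description then
        let ps := (PySem.Str.splitMax? description " vs " 1).getD []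
        (PySem.Str.strip (ps.getD 0 ""), PySem.Str.strip (ps.getD 1 ""))
      else if PySem.Str.isIn " | " description then
        let ps := (PySem.Str.splitMax? description " | " 1).getD []
        (PySem.Str.strip (ps.getD 0 ""), PySem.Str.strip (ps.getD 1 ""))
      else
        let words := PySem.Str.split₀ description
        let mid : Int := PySem.Int.floordiv (words.length : Int) 2
        (PySem.Str.join " " (PySem.List.slice words none (some mid)),
         PySem.Str.join " " (PySem.List.slice words (some mid) none))

-- ===== PORT B =====
-- _halves: the two stripped pieces around the first occurrence of sep (sep is present)
def pvHalves (d sep : String) : String × String :=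
  let ps := (PySem.Str.splitMax? d sep 1).getD []
  (PySem.Str.strip (ps.getD 0 ""), PySem.Str.strip (ps.getD 1 ""))

-- next((s for s in seps if s in d), None)
def pvFirstSep (seps : List String) (d : String) : Option String :=
  match seps with
  | [] => none
  | s :: rest => if PySem.Str.isIn s d then some s else pvFirstSep rest d

def parse_texture_description_alt (description : String) : String × String :=
  if PySem.Str.isIn " <TO> " description then pvHalves description " <TO> "
  else
    let parts := (PySem.Str.split? description " to ").getD []
    let n : Int := (parts.length : Int)
    if 2 ≤ n then
      -- wc = [len(p.split()) for p in parts]; total = words of the rejoined string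
      let wc : List Int := parts.map (fun p => ((PySem.Str.split₀ p).length : Int))
      let total : Int := wc.sum + n - 1
      -- prefix, acc = [0], 0; for w in wc: acc += w; prefix.append(acc)
      let pr := wc.foldl (fun (st : List Int × Int) w => (st.1 ++ [st.2 + w], st.2 + w))
        ([(0 : Int)], (0 : Int))
      let res := (PySem.List.pyRange 1 n 1).foldl
        (fun (st : Int × Option Int) i =>
          -- prefix[i] is in range for every i in range(1, n)
          let lw : Int := (PySem.List.pyGet? pr.1 i).getD 0 + i - 1
          let bal : Int := |2 * lw + 1 - total|
          if (match st.2 with | none => true | some b => decide (bal < b)) then (i, some bal)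
          else st)
        (1, none)
      (PySem.Str.strip (PySem.Str.join " to " (PySem.List.slice parts none (some res.1))),
       PySem.Str.strip (PySem.Str.join " to " (PySem.List.slice parts (some res.1) none)))
    else
      match pvFirstSep [" and ", " vs ", " | "] description with
      | some sep => pvHalves description sep
      | none =>
        let words := PySem.Str.split₀ description
        let mid : Int := PySem.Int.floordiv (words.length : Int) 2
        (PySem.Str.join " " (PySem.List.slice words none (some mid)),
         PySem.Str.join " " (PySem.List.slice words (some mid) none))

-- ===== PRECONDITION & SPEC =====
def Spec_parse_texture_description (description : String) (out : String × String) : Prop := out = parse_texture_description_alt description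
instance (description : String) (out : String × String) : Decidable (Spec_parse_texture_description description out) := by unfold Spec_parse_texture_description; infer_instance

-- ===== CLAIM =====
def Claim_equal_parse_texture_description : Prop := ∀ (description : String), Dom_parse_texture_description description → Spec_parse_texture_description description (parse_texture_description description)

-- ===== LEMMAS AND PROOFS =====

-- split₀.go flushes its `acc` accumulator to the front of the result
theorem pv_go_acc (s : List Char) : ∀ (cur : List Char) (acc : List (List Char)),
    PySem.Chars.split₀.go s cur acc = acc.reverse ++ PySem.Chars.split₀.go s cur [] := by
  induction s with
  | nil =>
      intro cur acc
      simp only [PySem.Chars.split₀.go]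
      split_ifs <;> simp
  | cons c rest ih =>
      intro cur acc
      simp only [PySem.Chars.split₀.go]
      by_cases hs : PySem.Chars.isspace c = true
      · simp only [hs, if_true]
        by_cases hc : cur.isEmpty = true
        · simp only [hc, if_true]; exact ih [] acc
        · simp only [hc]
          rw [ih [] (cur.reverse :: acc), ih [] (cur.reverse :: [])]
          simp
      · simp only [hs]
        exact ih (c :: cur) acc

-- a space splits the word scan cleanly
theorem pv_go_space (a : List Char) : ∀ (b : List Char) (cur : List Char),
    PySem.Chars.split₀.go (a ++ ' ' :: b) cur []
      = PySem.Chars.split₀.go a cur [] ++ PySem.Chars.split₀.go b [] [] := by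
  induction a with
  | nil =>
      intro b cur
      simp only [List.nil_append]
      simp only [PySem.Chars.split₀.go]
      have hsp : PySem.Chars.isspace ' ' = true := by decide
      simp only [hsp, if_true]
      by_cases hc : cur.isEmpty = true
      · simp [hc]
      · rw [if_neg hc, if_neg hc]
        rw [pv_go_acc b [] (cur.reverse :: [])]
  | cons c rest ih =>
      intro b cur
      simp only [List.cons_append]
      simp only [PySem.Chars.split₀.go]
      by_cases hs : PySem.Chars.isspace c = true
      · simp only [hs, if_true]
        by_cases hc : cur.isEmpty = true
        · simp only [hc, if_true]; exact ih b []
        · simp only [hc]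
          rw [pv_go_acc rest [] (cur.reverse :: []), pv_go_acc (rest ++ ' ' :: b) [] (cur.reverse :: []), ih b []]
          simp
      · simp only [hs]
        exact ih b (c :: cur)

theorem pv_split0_space (a b : List Char) :
    PySem.Chars.split₀ (a ++ ' ' :: b) = PySem.Chars.split₀ a ++ PySem.Chars.split₀ b := by
  simp only [PySem.Chars.split₀]
  exact pv_go_space a b []

theorem pv_split0_sep (a b : List Char) :
    PySem.Chars.split₀ (a ++ ([' ', 't', 'o', ' '] ++ b))
      = PySem.Chars.split₀ a ++ [['t', 'o']] ++ PySem.Chars.split₀ b := by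
  have h1 : a ++ ([' ', 't', 'o', ' '] ++ b) = a ++ ' ' :: (['t', 'o'] ++ ' ' :: b) := by simp
  rw [h1, pv_split0_space a (['t', 'o'] ++ ' ' :: b), pv_split0_space ['t', 'o'] b]
  have : PySem.Chars.split₀ ['t', 'o'] = [['t', 'o']] := by decide
  rw [this]
  simp

-- word count of ' to '.join of a nonempty list of char-parts
theorem pv_wcj (ps : List (List Char)) : ∀ (x : List Char),
    (PySem.Chars.split₀ (PySem.Chars.join [' ', 't', 'o', ' '] (x :: ps))).length
      = (PySem.Chars.split₀ x).length
        + ((ps.map (fun p => (PySem.Chars.split₀ p).length)).sum + ps.length) := by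
  induction ps with
  | nil => intro x; rw [PySem.Chars.join_singleton]; simp
  | cons y t ih =>
      intro x
      rw [PySem.Chars.join_cons_cons, List.append_assoc, pv_split0_sep]
      simp only [List.length_append, ih y, List.map_cons, List.sum_cons, List.length_cons,
        List.length_nil]
      omega

theorem pv_len_split0 (s : String) :
    (PySem.Str.split₀ s).length = (PySem.Chars.split₀ s.toList).length := by
  simp [PySem.Str.split₀]

-- the same at String level, Int-valued
theorem pv_wcjStr (x : String) (ps : List String) :
    (((PySem.Str.split₀ (PySem.Str.join " to " (x :: ps))).length : Int))
      = ((PySem.Str.split₀ x).length : Int)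
        + ((ps.map (fun p => ((PySem.Str.split₀ p).length : Int))).sum + (ps.length : Int)) := by
  have hsep : (" to " : String).toList = [' ', 't', 'o', ' '] := by decide
  have h := pv_wcj (ps.map String.toList) x.toList
  simp only [pv_len_split0, PySem.Str.toList_join, hsep, List.map_cons]
  rw [h]
  push_cast [Nat.cast_list_sum]
  simp only [List.map_map, Function.comp_def, List.length_map]

-- nonempty-list form of the word-count identity
theorem pv_wcjStr' (l : List String) (hl : l ≠ []) :
    (((PySem.Str.split₀ (PySem.Str.join " to " l)).length : Int))
      = (l.map (fun p => ((PySem.Str.split₀ p).length : Int))).sum + (l.length : Int) - 1 := by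
  cases l with
  | nil => exact absurd rfl hl
  | cons x ps =>
      rw [pv_wcjStr]
      simp only [List.map_cons, List.sum_cons, List.length_cons]
      push_cast
      ring

-- the prefix-sum building loop of B, characterised
theorem pv_prefix_fold (wc : List Int) : ∀ (ps : List Int) (s : Int),
    wc.foldl (fun (st : List Int × Int) w => (st.1 ++ [st.2 + w], st.2 + w)) (ps, s)
      = (ps ++ (List.range wc.length).map (fun k => s + ((wc.take (k + 1)).sum)), s + wc.sum) := by
  induction wc with
  | nil => intro ps s; simp
  | cons w t ih =>
      intro ps s
      simp only [List.foldl_cons, ih (ps ++ [s + w]) (s + w), List.length_cons,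
        List.range_succ_eq_map, List.map_cons, List.map_map]
      rw [Prod.mk.injEq]
      refine ⟨?_, by simp [add_assoc]⟩
      simp [List.take_succ_cons, Function.comp_def, List.append_assoc, add_assoc]

-- the per-index balance values of A's and B's scans coincide
theorem pv_bal_eq (parts : List String) (i : Int) (h1 : 1 ≤ i) (h2 : i < (parts.length : Int)) :
    |((PySem.Str.split₀ (PySem.Str.join " to " (PySem.List.slice parts none (some i)))).length : Int)
      - ((PySem.Str.split₀ (PySem.Str.join " to " (PySem.List.slice parts (some i) none))).length : Int)|
    = (let wc : List Int := parts.map (fun p => ((PySem.Str.split₀ p).length : Int))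
       let total : Int := wc.sum + (parts.length : Int) - 1
       let pr := wc.foldl (fun (st : List Int × Int) w => (st.1 ++ [st.2 + w], st.2 + w))
         ([(0 : Int)], (0 : Int))
       let lw : Int := (PySem.List.pyGet? pr.1 i).getD 0 + i - 1
       |2 * lw + 1 - total|) := by
  have hk : i = ((i.toNat : Nat) : Int) := by omega
  set k : Nat := i.toNat with hkdef
  have hk1 : 1 ≤ k := by omega
  have hkn : k < parts.length := by omega
  have hlt : (parts.take k).length = k := by
    rw [List.length_take]
    omega
  have htake : parts.take k ≠ [] := by
    intro h
    rw [h] at hlt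
    simp at hlt
    omega
  have hld : (parts.drop k).length = parts.length - k := List.length_drop
  have hdrop : parts.drop k ≠ [] := by
    intro h
    rw [h] at hld
    simp at hld
    omega
  rw [hk, PySem.List.slice_to parts (by positivity), PySem.List.slice_from parts (by positivity)]
  simp only [Int.toNat_natCast]
  rw [pv_wcjStr' _ htake, pv_wcjStr' _ hdrop]
  simp only [pv_prefix_fold, PySem.List.pyGet?_natCast, List.map_take, List.map_drop,
    List.length_take, List.length_drop, List.length_map]
  rw [List.getElem?_append_right (by simp; omega)]
  rw [List.getElem?_map, List.getElem?_range (by simp; omega)]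
  simp only [List.length_cons, List.length_nil, Option.map_some, Option.getD_some]
  have hk' : k - 1 + 1 = k := by omega
  rw [hk']
  have hsum := List.sum_take_add_sum_drop (parts.map (fun p => ((PySem.Str.split₀ p).length : Int))) k
  have hmin : min k parts.length = k := by omega
  rw [hmin]
  apply congrArg
  generalize hS1 : ((parts.map (fun p => ((PySem.Str.split₀ p).length : Int))).take k).sum = S1 at *
  generalize hS2 : ((parts.map (fun p => ((PySem.Str.split₀ p).length : Int))).drop k).sum = S2 at *
  generalize hT : (parts.map (fun p => ((PySem.Str.split₀ p).length : Int))).sum = T at *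
  omega

-- the two scans return the same (best index, best balance) state
theorem pv_loop_eq (parts : List String) :
    (PySem.List.pyRange 1 (parts.length : Int) 1).foldl
      (fun (st : Int × Option Int) i =>
        let leftS := PySem.Str.join " to " (PySem.List.slice parts none (some i))
        let rightS := PySem.Str.join " to " (PySem.List.slice parts (some i) none)
        let balance : Int :=
          |((PySem.Str.split₀ leftS).length : Int) - ((PySem.Str.split₀ rightS).length : Int)|
        if (match st.2 with | none => true | some b => decide (balance < b)) then (i, some balance)
        else st)
      (1, none)
    = (let wc : List Int := parts.map (fun p => ((PySem.Str.split₀ p).length : Int))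
       let total : Int := wc.sum + (parts.length : Int) - 1
       let pr := wc.foldl (fun (st : List Int × Int) w => (st.1 ++ [st.2 + w], st.2 + w))
         ([(0 : Int)], (0 : Int))
       (PySem.List.pyRange 1 (parts.length : Int) 1).foldl
        (fun (st : Int × Option Int) i =>
          let lw : Int := (PySem.List.pyGet? pr.1 i).getD 0 + i - 1
          let bal : Int := |2 * lw + 1 - total|
          if (match st.2 with | none => true | some b => decide (bal < b)) then (i, some bal)
          else st)
        (1, none)) := by
  apply PySem.List.foldl_congr_mem
  intro acc x hx
  rw [PySem.List.mem_pyRange_one] at hx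
  have hb := pv_bal_eq parts x hx.1 hx.2
  simp only at hb ⊢
  rw [hb]

-- ' to '.join of a one-element list is that element
theorem pv_join_one (a : String) : PySem.Str.join " to " [a] = a := by
  simp [PySem.Str.join, PySem.Chars.join_singleton]

-- ===== VERDICT =====
set_option maxHeartbeats 1000000 in
theorem parse_texture_description_spec : Claim_equal_parse_texture_description := by
  intro description _
  unfold Spec_parse_texture_description
  unfold parse_texture_description parse_texture_description_alt pvHalves
  by_cases h1 : PySem.Str.isIn " <TO> " description = true
  · simp only [h1, if_true]
  · simp only [h1, Bool.false_eq_true, if_false]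
    by_cases h2 : ((PySem.Str.split? description " to ").getD []).length = 2
    · -- A returns the two stripped parts; B runs the merged loop on exactly two parts
      have h2' : (2 : Int) ≤ ((((PySem.Str.split? description " to ").getD []).length : Int)) := by
        omega
      rw [if_pos h2, if_pos h2']
      obtain ⟨a, b, hab⟩ := List.length_eq_two.mp h2
      rw [hab]
      have hL : (([a, b] : List String).length : Int) = ((2 : Nat) : Int) := by simp
      have hr : PySem.List.pyRange 1 ((2 : Nat) : Int) 1 = [1] := by decide
      rw [hL, hr]
      simp only [List.foldl_cons, List.foldl_nil, if_true]
      rw [PySem.List.slice_to [a, b] (show (0 : Int) ≤ 1 by norm_num),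
          PySem.List.slice_from [a, b] (show (0 : Int) ≤ 1 by norm_num)]
      simp only [Int.toNat_one, List.take_succ_cons, List.take_zero, List.drop_succ_cons,
        List.drop_zero, pv_join_one]
      simp [List.getD]
    · have h2' : ¬ (((PySem.Str.split? description " to ").getD []).length) = 2 := h2
      rw [if_neg h2']
      by_cases h3 : 2 < ((PySem.Str.split? description " to ").getD []).length
      · have h3' : (2 : Int) ≤ ((((PySem.Str.split? description " to ").getD []).length : Int)) := by
          omega
        rw [if_pos h3, if_pos h3']
        simp only [pv_loop_eq]
      · have h3' : ¬ (2 : Int) ≤ ((((PySem.Str.split? description " to ").getD []).length : Int)) := by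
          omega
        rw [if_neg h3, if_neg h3']
        simp only [pvFirstSep]
        by_cases ha : PySem.Str.isIn " and " description = true
        · simp only [ha, if_true]
        · simp only [ha, Bool.false_eq_true, if_false]
          by_cases hv : PySem.Str.isIn " vs " description = true
          · simp only [hv, if_true]
          · simp only [hv, Bool.false_eq_true, if_false]
            by_cases hb : PySem.Str.isIn " | " description = true
            · simp only [hb, if_true]
            · simp only [hb, Bool.false_eq_true, if_false]
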